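-- pv_equiv track=rewrite | github.com/chameleonlabs2021/project-spulse-datediff | datediff_v12.py | daycheck
-- ===== SOURCE A (Python) =====
-- def leapyr(year):
--     leap = False
--     if (year % 4) == 0:
--         if (year % 100) == 0:
--             if (year % 400) == 0:
--                 leap= True
--         else:
--             leap = True
--     return leap
--
-- def daycheck(year,month,day):
--     monthlist1 = [1,3,5,7,8,10,12] ## monthlist for months with 31 days.
--     monthlist2 = [4,6,9,11] ## monthlist for months with 30 days.
--     monthlist3 = 2 ## month with month with 28 days.
--
--     for mon in monthlist1: ## iterate through monthlist1.
--         if month == mon: ## Check if the parameter month equals to any month with 31 days.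
--             if day >=1 and day <= 31: ## If the parameter day is between 1 and 31, return True.
--                 return True
--             else:
--                 return False
--
--     for mon in monthlist2: ## iterate through the monthlist with 30 days.
--         if month == mon: ## check if the parameter month equals to any month with 30 days.
--             if day >= 1 and day <= 30: ## if the parameter day is between 1 and 30,return True.
--                 return True
--             else:
--                 return False
--     if leapyr(year) == True:
--         if month == monthlist3: ## check if parameter month equals month with 28 days.
--             if day >=1 and day <= 29: ## if the parameter day is between 1 and 28,return True.
--                 return True
--             else:
--                 return False
--     else:
--         if month == monthlist3: ## check if parameter month equals month with 28 days.
--             if day >=1 and day <= 28: ## if the parameter day is between 1 and 28,return True.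
--                 return True
--             else:
--                 return False
-- ===== SOURCE B (Python) =====
-- def leapyr(year):
--     return year % 4 == 0 and (year % 100 != 0 or year % 400 == 0)
--
-- def daycheck(year, month, day):
--     days = {1: 31, 2: 29 if leapyr(year) else 28, 3: 31, 4: 30, 5: 31,
--             6: 30, 7: 31, 8: 31, 9: 30, 10: 31, 11: 30, 12: 31}
--     if month not in days:
--         return None
--     return 1 <= day <= days[month]
-- ===== Notes on version B (the rewrite author's own statement) =====
-- stated objective: simpler
-- what changed: Replaces the two sequential membership loops and the duplicated leap/non-leap February branches with a single month-to-max-days table lookup followed by one range check (None when the month is not a key).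
import Mathlib
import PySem

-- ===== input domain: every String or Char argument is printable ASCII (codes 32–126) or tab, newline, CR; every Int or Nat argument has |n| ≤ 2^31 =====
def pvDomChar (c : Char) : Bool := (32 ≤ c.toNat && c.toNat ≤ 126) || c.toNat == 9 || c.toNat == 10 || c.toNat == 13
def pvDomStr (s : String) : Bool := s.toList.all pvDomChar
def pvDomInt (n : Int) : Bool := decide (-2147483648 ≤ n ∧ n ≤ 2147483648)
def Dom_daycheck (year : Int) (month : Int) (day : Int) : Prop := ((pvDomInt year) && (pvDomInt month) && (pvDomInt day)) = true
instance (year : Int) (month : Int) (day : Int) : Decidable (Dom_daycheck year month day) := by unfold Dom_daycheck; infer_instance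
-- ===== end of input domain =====

-- B replaces A's sequential membership loops and duplicated February branches by one
-- month→max-days table lookup plus a single range check (objective: simpler).

-- ===== PORT A =====
def leapyrA (year : Int) : Bool :=
  let leap := false
  if PySem.Int.mod year 4 = 0 then
    if PySem.Int.mod year 100 = 0 then
      (if PySem.Int.mod year 400 = 0 then true else leap)
    else true
  else leap

-- the 'for mon in monthlist: if month == mon: …return…' loop, with maxd the inner bound
def monLoop (month day maxd : Int) : List Int → Option Bool
  | [] => none
  | mon :: rest =>
      if month = mon then
        (if day ≥ 1 ∧ day ≤ maxd then some true else some false)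
      else monLoop month day maxd rest

def daycheck (year : Int) (month : Int) (day : Int) : Option Bool :=
  let monthlist1 : List Int := [1,3,5,7,8,10,12]
  let monthlist2 : List Int := [4,6,9,11]
  let monthlist3 : Int := 2
  match monLoop month day 31 monthlist1 with
  | some b => some b
  | none =>
    match monLoop month day 30 monthlist2 with
    | some b => some b
    | none =>
      if leapyrA year = true then
        if month = monthlist3 then
          (if day ≥ 1 ∧ day ≤ 29 then some true else some false)
        else none
      else
        if month = monthlist3 then
          (if day ≥ 1 ∧ day ≤ 28 then some true else some false)
        else none

-- ===== PORT B =====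
def leapyrB (year : Int) : Bool :=
  PySem.Int.mod year 4 = 0 ∧ (PySem.Int.mod year 100 ≠ 0 ∨ PySem.Int.mod year 400 = 0)

def daycheck_alt (year : Int) (month : Int) (day : Int) : Option Bool :=
  let feb : Int := if leapyrB year then 29 else 28
  -- the Python dict literal (all keys distinct) as a literal Dict
  let days : PySem.Dict Int Int :=
    PySem.Dict.mk [(1,31),(2,feb),(3,31),(4,30),(5,31),(6,30),(7,31),(8,31),(9,30),(10,31),(11,30),(12,31)]
  match days.get? month with
  | none => none
  | some maxday => some (decide (1 ≤ day ∧ day ≤ maxday))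

-- ===== PRECONDITION & SPEC =====
def Spec_daycheck (year : Int) (month : Int) (day : Int) (out : Option Bool) : Prop := out = daycheck_alt year month day
instance (year : Int) (month : Int) (day : Int) (out : Option Bool) : Decidable (Spec_daycheck year month day out) := by unfold Spec_daycheck; infer_instance

-- ===== CLAIM (what is proved, stated in full; the proofs are below) =====
def Claim_equal_daycheck : Prop := ∀ (year : Int) (month : Int) (day : Int), Dom_daycheck year month day → Spec_daycheck year month day (daycheck year month day)

-- ===== LEMMAS AND PROOFS =====
theorem leapyr_agree (year : Int) : leapyrA year = leapyrB year := by
  simp only [leapyrA, leapyrB]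
  by_cases h4 : PySem.Int.mod year 4 = 0 <;>
    by_cases h100 : PySem.Int.mod year 100 = 0 <;>
      by_cases h400 : PySem.Int.mod year 400 = 0 <;>
        simp_all

-- ===== VERDICT (by name: the statement is the Claim_ definition above) =====
theorem daycheck_spec : Claim_equal_daycheck := by
  intro year month day _
  show daycheck year month day = daycheck_alt year month day
  have hl := leapyr_agree year
  by_cases h1 : month = 1
  · subst h1
    simp [daycheck, daycheck_alt, monLoop, PySem.Dict.get?_mk_cons]
    split_ifs with h <;> simp <;> omega
  by_cases h2 : month = 2
  · subst h2
    simp [daycheck, daycheck_alt, monLoop, PySem.Dict.get?_mk_cons]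
    rw [hl]
    cases hb : leapyrB year <;> simp [hb] <;> split_ifs with h <;> simp <;> omega
  by_cases h3 : month = 3
  · subst h3
    simp [daycheck, daycheck_alt, monLoop, PySem.Dict.get?_mk_cons]
    split_ifs with h <;> simp <;> omega
  by_cases h4 : month = 4
  · subst h4
    simp [daycheck, daycheck_alt, monLoop, PySem.Dict.get?_mk_cons]
    split_ifs with h <;> simp <;> omega
  by_cases h5 : month = 5
  · subst h5
    simp [daycheck, daycheck_alt, monLoop, PySem.Dict.get?_mk_cons]
    split_ifs with h <;> simp <;> omega
  by_cases h6 : month = 6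
  · subst h6
    simp [daycheck, daycheck_alt, monLoop, PySem.Dict.get?_mk_cons]
    split_ifs with h <;> simp <;> omega
  by_cases h7 : month = 7
  · subst h7
    simp [daycheck, daycheck_alt, monLoop, PySem.Dict.get?_mk_cons]
    split_ifs with h <;> simp <;> omega
  by_cases h8 : month = 8
  · subst h8
    simp [daycheck, daycheck_alt, monLoop, PySem.Dict.get?_mk_cons]
    split_ifs with h <;> simp <;> omega
  by_cases h9 : month = 9
  · subst h9
    simp [daycheck, daycheck_alt, monLoop, PySem.Dict.get?_mk_cons]
    split_ifs with h <;> simp <;> omega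
  by_cases h10 : month = 10
  · subst h10
    simp [daycheck, daycheck_alt, monLoop, PySem.Dict.get?_mk_cons]
    split_ifs with h <;> simp <;> omega
  by_cases h11 : month = 11
  · subst h11
    simp [daycheck, daycheck_alt, monLoop, PySem.Dict.get?_mk_cons]
    split_ifs with h <;> simp <;> omega
  by_cases h12 : month = 12
  · subst h12
    simp [daycheck, daycheck_alt, monLoop, PySem.Dict.get?_mk_cons]
    split_ifs with h <;> simp <;> omega
  simp [daycheck, daycheck_alt, monLoop, PySem.Dict.get?, h1, h2, h3, h4, h5, h6, h7, h8, h9, h10, h11, h12, Ne.symm h1, Ne.symm h2, Ne.symm h3, Ne.symm h4, Ne.symm h5, Ne.symm h6, Ne.symm h7, Ne.symm h8, Ne.symm h9, Ne.symm h10, Ne.symm h11, Ne.symm h12]
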